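-- pv_equiv track=rewrite | github.com/nirdizati-research/predict-python | src/encoding/declare/declaretemplates.py | template_not_chain_succession
-- ===== SOURCE A (Python) =====
-- def template_not_chain_succession(trace, event_set):
--     """
--     TODO: check vacuity conditions for not templates.
--     :param trace:
--     :param event_set:
--     :return:
--     """
--     assert (len(event_set) == 2)
--
--     event_1 = event_set[0]
--     event_2 = event_set[1]
--
--     if event_1 in trace and event_2 in trace:
--         # Find a place, where A and B are next
--         event_1_positions = trace[event_1]
--         event_2_positions = trace[event_2]
--
--         e1_ind = 0
--         e2_ind = 0
--         while True:
--             if e1_ind >= len(event_1_positions) or e2_ind >= len(event_2_positions):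
--                 return 1, False  # no more choices
--
--             current_e1 = event_1_positions[e1_ind]
--             current_e2 = event_2_positions[e2_ind]
--
--             if current_e1 > current_e2:
--                 e2_ind += 1
--             else:
--                 if current_e1 + 1 == current_e2:
--                     return -1, False  # found a place, where they are together
--                 e1_ind += 1
--
--     # How to do vacuity here? 1 by default most likely
--     return 0, True  # TODO, this condition?
-- ===== SOURCE B (Python) =====
-- def _bisect_left(lst, x):
--     lo, hi = 0, len(lst)
--     while lo < hi:
--         mid = (lo + hi) // 2
--         if lst[mid] < x:
--             lo = mid + 1
--         else:
--             hi = mid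
--     return lo
--
--
-- def template_not_chain_succession(trace, event_set):
--     assert (len(event_set) == 2)
--     event_1, event_2 = event_set
--     if event_1 not in trace or event_2 not in trace:
--         return 0, True
--     pos1 = trace[event_1]
--     pos2 = trace[event_2]
--     n = len(pos2)
--     for a in pos1:
--         idx = _bisect_left(pos2, a)
--         if idx < n and pos2[idx] == a + 1:
--             return -1, False
--     return 1, False
-- ===== Notes on version B (the rewrite author's own statement) =====
-- stated objective: alternative
-- what changed: Replaces A's merge-style two-pointer walk over both position lists by an independent per-element binary search: for each position a of event_1 a fresh hand-written bisect_left locates the first event_2 position >= a and checks whether it equals a+1; no cursor state is shared between iterations.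
-- outside the precondition, e.g. on template_not_chain_succession({'a': [5, 1], 'b': [2]}, ['a', 'b']): A returns (1, False), B returns (-1, False)
import Mathlib
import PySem

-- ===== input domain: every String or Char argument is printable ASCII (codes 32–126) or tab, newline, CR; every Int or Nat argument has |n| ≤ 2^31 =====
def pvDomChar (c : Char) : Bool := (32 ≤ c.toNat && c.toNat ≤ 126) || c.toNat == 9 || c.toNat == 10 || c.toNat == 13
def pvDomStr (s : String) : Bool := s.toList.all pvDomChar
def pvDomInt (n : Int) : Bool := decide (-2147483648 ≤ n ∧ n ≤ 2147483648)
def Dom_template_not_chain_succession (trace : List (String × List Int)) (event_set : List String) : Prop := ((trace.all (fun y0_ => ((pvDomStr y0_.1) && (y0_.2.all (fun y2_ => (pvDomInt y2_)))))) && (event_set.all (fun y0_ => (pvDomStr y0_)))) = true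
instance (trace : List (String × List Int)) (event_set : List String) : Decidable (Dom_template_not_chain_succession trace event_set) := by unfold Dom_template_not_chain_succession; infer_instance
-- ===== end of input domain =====

-- B replaces A's two-pointer merge walk by an independent per-element binary search
-- (a hand-written bisect_left per event_1 position); return value only, no mutation.

-- ===== PORT A =====
-- A's inner 'while True' over the two explicit indices e1_ind, e2_ind
def tncsLoopA (p1 p2 : List Int) (i j : Nat) : Int × Bool :=
  if i ≥ p1.length ∨ j ≥ p2.length then (1, false)
  else
    let a := p1.getD i 0
    let b := p2.getD j 0
    if a > b then tncsLoopA p1 p2 i (j + 1)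
    else if a + 1 = b then (-1, false)
    else tncsLoopA p1 p2 (i + 1) j
termination_by (p1.length - i) + (p2.length - j)
decreasing_by all_goals omega

def template_not_chain_succession (trace : List (String × List Int)) (event_set : List String) : Int × Bool :=
  -- assert len(event_set) == 2 : raises outside Pre_
  let event_1 := event_set.getD 0 ""
  let event_2 := event_set.getD 1 ""
  let d := PySem.Dict.mk trace
  if (d.contains event_1 && d.contains event_2) then
    let event_1_positions := (d.get? event_1).getD []
    let event_2_positions := (d.get? event_2).getD []
    tncsLoopA event_1_positions event_2_positions 0 0
  else (0, true)

-- ===== PORT B =====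
-- Source B's hand-written _bisect_left: 'while lo < hi: mid = (lo+hi)//2; …'
def tncsBisect (lst : List Int) (x : Int) (lo hi : Nat) : Nat :=
  if lo < hi then
    let mid := (lo + hi) / 2
    if lst.getD mid 0 < x then tncsBisect lst x (mid + 1) hi
    else tncsBisect lst x lo mid
  else lo
termination_by hi - lo
decreasing_by all_goals omega

-- 'for a in pos1: idx = _bisect_left(pos2, a); …'
def tncsScan (p2 : List Int) : List Int → Int × Bool
  | [] => (1, false)
  | a :: rest =>
    let idx := tncsBisect p2 a 0 p2.length
    if idx < p2.length ∧ p2.getD idx 0 = a + 1 then (-1, false)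
    else tncsScan p2 rest

def template_not_chain_succession_alt (trace : List (String × List Int)) (event_set : List String) : Int × Bool :=
  let d := PySem.Dict.mk trace
  let event_1 := event_set.getD 0 ""
  let event_2 := event_set.getD 1 ""
  if !(d.contains event_1) || !(d.contains event_2) then (0, true)
  else
    let pos1 := (d.get? event_1).getD []
    let pos2 := (d.get? event_2).getD []
    tncsScan pos2 pos1

-- ===== PRECONDITION & SPEC =====
-- Pre_ excludes event_set of length ≠ 2 (A's assert raises AssertionError) and, when both queried
-- event names occur in the trace, traces whose position list under either queried name is
-- non-ascending, on which A's merge-style early exit yields an accidental, order-dependent value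
-- (positions of events in a trace are ascending by construction).
def Pre_template_not_chain_succession (trace : List (String × List Int)) (event_set : List String) : Prop :=
  event_set.length = 2 ∧
    ((∃ p ∈ trace, p.1 = event_set.getD 0 "") ∧ (∃ q ∈ trace, q.1 = event_set.getD 1 "") →
      ∀ p ∈ trace,
        (p.1 = event_set.getD 0 "" ∨ p.1 = event_set.getD 1 "") → p.2.Pairwise (· ≤ ·))
instance (trace : List (String × List Int)) (event_set : List String) : Decidable (Pre_template_not_chain_succession trace event_set) := by unfold Pre_template_not_chain_succession; infer_instance
def pvWitness_template_not_chain_succession : (List (String × List Int)) × List String := ([("a", [1, 3]), ("b", [2])], ["a", "b"])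

def Spec_template_not_chain_succession (trace : List (String × List Int)) (event_set : List String) (out : Int × Bool) : Prop := out = template_not_chain_succession_alt trace event_set
instance (trace : List (String × List Int)) (event_set : List String) (out : Int × Bool) : Decidable (Spec_template_not_chain_succession trace event_set out) := by unfold Spec_template_not_chain_succession; infer_instance

-- ===== CLAIM =====
def Claim_equal_template_not_chain_succession : Prop := ∀ (trace : List (String × List Int)) (event_set : List String), Dom_template_not_chain_succession trace event_set → Pre_template_not_chain_succession trace event_set → Spec_template_not_chain_succession trace event_set (template_not_chain_succession trace event_set)

-- ===== LEMMAS AND PROOFS =====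

lemma tncsGetD (l : List Int) (i : Nat) (h : i < l.length) : l.getD i 0 = l[i] := by
  rw [List.getD_eq_getElem?_getD, List.getElem?_eq_getElem h]; rfl

-- proof-only helpers: A's loop re-expressed as a persistent-cursor walk (bridge between the ports)
def tncsSkip (p2 : List Int) (a : Int) (j : Nat) : Nat :=
  if j < p2.length then
    if p2.getD j 0 < a then tncsSkip p2 a (j + 1) else j
  else j
termination_by p2.length - j
decreasing_by omega

def tncsWalk (p2 : List Int) (j : Nat) : List Int → Int × Bool
  | [] => (1, false)
  | a :: rest =>
    let j' := tncsSkip p2 a j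
    if j' = p2.length then (1, false)
    else if a + 1 = p2.getD j' 0 then (-1, false)
    else tncsWalk p2 j' rest

lemma tncsLoopA_eq_walk (p1 p2 : List Int) (i j : Nat) (hj : j ≤ p2.length) :
    tncsLoopA p1 p2 i j = tncsWalk p2 j (p1.drop i) := by
  fun_induction tncsLoopA p1 p2 i j with
  | case1 i j h =>
    rcases h with h | h
    · rw [List.drop_eq_nil_of_le h]; rfl
    · have hi : i < p1.length ∨ p1.length ≤ i := by omega
      rcases hi with hi | hi
      · rw [List.drop_eq_getElem_cons hi]
        have hjl : j = p2.length := by omega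
        simp [tncsWalk, tncsSkip, hjl]
      · rw [List.drop_eq_nil_of_le hi]; rfl
  | case2 i j h a b hab ih =>
    have hi : i < p1.length := by omega
    have hjl : j < p2.length := by omega
    have ha : a = p1.getD i 0 := rfl
    have hb : b = p2.getD j 0 := rfl
    rw [ih (by omega), List.drop_eq_getElem_cons hi]
    have hskip : tncsSkip p2 p1[i] j = tncsSkip p2 p1[i] (j + 1) := by
      rw [tncsSkip, if_pos hjl, if_pos (by rw [← tncsGetD p1 i hi, ← ha, ← hb]; omega)]
    simp only [tncsWalk, hskip]
  | case3 i j h a b hab heq =>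
    have hi : i < p1.length := by omega
    have hjl : j < p2.length := by omega
    rw [List.drop_eq_getElem_cons hi]
    have hskip : tncsSkip p2 p1[i] j = j := by
      rw [tncsSkip, if_pos hjl, if_neg (by rw [← tncsGetD p1 i hi]; omega)]
    simp only [tncsWalk, hskip]
    rw [if_neg (by omega), if_pos (by rw [← tncsGetD p1 i hi]; omega)]
  | case4 i j h a b hab hne ih =>
    have hi : i < p1.length := by omega
    have hjl : j < p2.length := by omega
    rw [ih hj, List.drop_eq_getElem_cons hi]
    have hskip : tncsSkip p2 p1[i] j = j := by
      rw [tncsSkip, if_pos hjl, if_neg (by rw [← tncsGetD p1 i hi]; omega)]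
    simp only [tncsWalk, hskip]
    rw [if_neg (by omega), if_neg (by rw [← tncsGetD p1 i hi]; omega)]

-- characterization shared by tncsSkip's result and tncsBisect's result
def tncsCut (p2 : List Int) (a : Int) (r : Nat) : Prop :=
  r ≤ p2.length ∧ (∀ k, k < r → (hk : k < p2.length) → p2[k] < a) ∧
    ((hr : r < p2.length) → a ≤ p2[r])

lemma tncsCut_unique (p2 : List Int) (a : Int) (r s : Nat)
    (hr : tncsCut p2 a r) (hs : tncsCut p2 a s) : r = s := by
  obtain ⟨hr1, hr2, hr3⟩ := hr
  obtain ⟨hs1, hs2, hs3⟩ := hs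
  by_contra hne
  rcases Nat.lt_or_ge r s with h | h
  · have hrl : r < p2.length := by omega
    have := hs2 r h hrl
    have := hr3 hrl
    omega
  · have hlt : s < r := by omega
    have hsl : s < p2.length := by omega
    have := hr2 s hlt hsl
    have := hs3 hsl
    omega

lemma tncsSkip_cut (p2 : List Int) (a : Int) (j : Nat)
    (hj : j ≤ p2.length)
    (h1 : ∀ k, k < j → (hk : k < p2.length) → p2[k] < a) :
    tncsCut p2 a (tncsSkip p2 a j) ∧ j ≤ tncsSkip p2 a j := by
  fun_induction tncsSkip p2 a j with
  | case1 j hjl hlt ih =>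
    have h1' : ∀ k, k < j + 1 → (hk : k < p2.length) → p2[k] < a := by
      intro k hk hkl
      rcases Nat.lt_or_ge k j with h | h
      · exact h1 k h hkl
      · have : k = j := by omega
        subst this
        rw [← tncsGetD p2 k hkl]; exact hlt
    obtain ⟨hc, hle⟩ := ih (by omega) h1'
    exact ⟨hc, by omega⟩
  | case2 j hjl hge =>
    refine ⟨⟨by omega, h1, fun hr => ?_⟩, le_refl j⟩
    rw [← tncsGetD p2 j hjl]; omega
  | case3 j hjl =>
    have hje : j = p2.length := by omega
    exact ⟨⟨by omega, h1, fun hr => by omega⟩, le_refl j⟩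

lemma tncsBisect_cut (p2 : List Int) (a : Int) (lo hi : Nat)
    (hs : p2.Pairwise (· ≤ ·))
    (hlh : lo ≤ hi) (hhi : hi ≤ p2.length)
    (h1 : ∀ k, k < lo → (hk : k < p2.length) → p2[k] < a)
    (h2 : ∀ k, hi ≤ k → (hk : k < p2.length) → a ≤ p2[k]) :
    tncsCut p2 a (tncsBisect p2 a lo hi) := by
  have hmono := List.pairwise_iff_getElem.mp hs
  fun_induction tncsBisect p2 a lo hi with
  | case1 lo hi hlt mid hm ih =>
    have hmid : mid < p2.length := by omega
    apply ih (by omega) hhi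
    · intro k hk hkl
      rcases Nat.lt_or_ge k lo with h | h
      · exact h1 k h hkl
      · have : k ≤ mid := by omega
        rcases Nat.lt_or_eq_of_le this with h' | h'
        · have := hmono k mid hkl hmid h'
          have : p2[mid] < a := by rw [← tncsGetD p2 mid hmid]; exact hm
          omega
        · rw [← tncsGetD p2 k hkl, h']; exact hm
    · exact h2
  | case2 lo hi hlt mid hm ih =>
    have hmid : mid < p2.length := by omega
    apply ih (by omega) (by omega) h1
    intro k hk hkl
    have ha : a ≤ p2[mid] := by rw [← tncsGetD p2 mid hmid]; omega
    rcases Nat.lt_or_eq_of_le hk with h | h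
    · have := hmono mid k hmid hkl (by omega)
      omega
    · subst h; exact ha
  | case3 lo hi hge =>
    have : lo = hi := by omega
    subst this
    exact ⟨by omega, h1, fun hr => h2 lo (le_refl lo) hr⟩

lemma tncsScan_exhausted (p2 : List Int) (l : List Int)
    (hs : p2.Pairwise (· ≤ ·))
    (H : ∀ x ∈ l, ∀ k, (hk : k < p2.length) → p2[k] < x) :
    tncsScan p2 l = (1, false) := by
  induction l with
  | nil => rfl
  | cons a rest ih =>
    have hcutB := tncsBisect_cut p2 a 0 p2.length hs (by omega) (le_refl _)
      (by omega) (fun k hk hkl => by omega)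
    have hcutF : tncsCut p2 a p2.length :=
      ⟨le_refl _, fun k hk hkl => H a (by simp) k hkl, fun hr => by omega⟩
    have heq := tncsCut_unique p2 a _ _ hcutB hcutF
    rw [tncsScan, if_neg (by rw [heq]; omega)]
    exact ih (fun x hx k hkl => H x (by simp [hx]) k hkl)

lemma tncsWalk_eq_scan (p2 : List Int) (l : List Int) (j : Nat)
    (hs2 : p2.Pairwise (· ≤ ·)) (hl : l.Pairwise (· ≤ ·)) (hj : j ≤ p2.length)
    (H : ∀ x ∈ l, ∀ k, k < j → (hk : k < p2.length) → p2[k] < x) :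
    tncsWalk p2 j l = tncsScan p2 l := by
  induction l generalizing j with
  | nil => rfl
  | cons a rest ih =>
    have hrest : ∀ x ∈ rest, a ≤ x := fun x hx => (List.pairwise_cons.mp hl).1 x hx
    have hlr : rest.Pairwise (· ≤ ·) := (List.pairwise_cons.mp hl).2
    have Ha : ∀ k, k < j → (hk : k < p2.length) → p2[k] < a :=
      fun k hk hkl => H a (by simp) k hk hkl
    obtain ⟨hcutS, hjle⟩ := tncsSkip_cut p2 a j hj Ha
    have hcutB := tncsBisect_cut p2 a 0 p2.length hs2 (by omega) (le_refl _)
      (by omega) (fun k hk hkl => by omega)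
    have heq : tncsSkip p2 a j = tncsBisect p2 a 0 p2.length :=
      tncsCut_unique p2 a _ _ hcutS hcutB
    obtain ⟨hS1, hS2, hS3⟩ := hcutS
    by_cases hend : tncsSkip p2 a j = p2.length
    · -- walk stops with (1, false); every bisect from rest also lands at the end
      rw [tncsWalk, if_pos hend, tncsScan, if_neg (by rw [← heq, hend]; omega)]
      have : tncsScan p2 rest = (1, false) := by
        apply tncsScan_exhausted p2 rest hs2
        intro x hx k hkl
        have hpa : p2[k] < a := hS2 k (by omega) hkl
        have := hrest x hx
        omega
      rw [this]
    · have hlt : tncsSkip p2 a j < p2.length := by omega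
      by_cases hmatch : a + 1 = p2.getD (tncsSkip p2 a j) 0
      · rw [tncsWalk, if_neg hend, if_pos hmatch,
          tncsScan, if_pos ⟨by omega, by rw [← heq]; omega⟩]
      · rw [tncsWalk, if_neg hend, if_neg hmatch,
          tncsScan, if_neg (by rw [← heq]; intro ⟨h1', h2'⟩; exact hmatch h2'.symm)]
        refine ih (tncsSkip p2 a j) hlr hS1 ?_
        intro x hx k hk hkl
        have hpa : p2[k] < a := hS2 k hk hkl
        have := hrest x hx
        omega

lemma tncsDictGet_mem {ν : Type} (trace : List (String × ν)) (k : String) (v : ν)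
    (h : (PySem.Dict.mk trace).get? k = some v) : ∃ p ∈ trace, p.1 = k ∧ p.2 = v := by
  induction trace with
  | nil => simp [PySem.Dict.get?] at h
  | cons hd tl ih =>
    rw [show PySem.Dict.mk (hd :: tl) = { items := (hd.1, hd.2) :: tl } from rfl,
      PySem.Dict.get?_mk_cons] at h
    by_cases hk : (hd.1 == k) = true
    · rw [if_pos hk] at h
      exact ⟨hd, by simp, eq_of_beq hk, by injection h⟩
    · rw [if_neg hk] at h
      obtain ⟨p, hp, hkv, hv⟩ := ih h
      exact ⟨p, by simp [hp], hkv, hv⟩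

-- ===== VERDICT =====
theorem template_not_chain_succession_spec : Claim_equal_template_not_chain_succession := by
  intro trace event_set _ hpre
  unfold Spec_template_not_chain_succession
  unfold template_not_chain_succession template_not_chain_succession_alt
  cases h1 : (PySem.Dict.mk trace).get? (event_set.getD 0 "") with
  | none => simp only [PySem.Dict.contains_eq_isSome_get?, h1, Option.isSome_none,
      Bool.false_and, Bool.false_eq_true, if_false, Bool.not_false, Bool.true_or, if_true]
  | some p1 =>
    cases h2 : (PySem.Dict.mk trace).get? (event_set.getD 1 "") with
    | none => simp only [PySem.Dict.contains_eq_isSome_get?, h1, h2, Option.isSome_none,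
        Option.isSome_some, Bool.and_false, Bool.false_eq_true, if_false,
        Bool.not_false, Bool.not_true, Bool.or_true, if_true]
    | some p2 =>
      simp only [PySem.Dict.contains_eq_isSome_get?, h1, h2, Option.isSome_some,
        Bool.and_self, if_true, Option.getD_some, Bool.not_true, Bool.or_self,
        Bool.false_eq_true, if_false]
      obtain ⟨q1, hq1, hk1, hv1⟩ := tncsDictGet_mem trace _ p1 h1
      obtain ⟨q2, hq2, hk2, hv2⟩ := tncsDictGet_mem trace _ p2 h2
      have hboth := hpre.2 ⟨⟨q1, hq1, hk1⟩, ⟨q2, hq2, hk2⟩⟩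
      have hs1 : p1.Pairwise (· ≤ ·) := hv1 ▸ hboth q1 hq1 (Or.inl hk1)
      have hs2 : p2.Pairwise (· ≤ ·) := hv2 ▸ hboth q2 hq2 (Or.inr hk2)
      rw [tncsLoopA_eq_walk p1 p2 0 0 (by omega)]
      simpa using tncsWalk_eq_scan p2 p1 0 hs2 hs1 (by omega) (by omega)
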